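-- pv_equiv track=rewrite | github.com/qsantos/crpyt | ciphers/util.py | words_to_bytes
-- ===== SOURCE A (Python) =====
-- def words_to_bytes(L, ws, byteorder):
-- 	R = []
-- 	for w in L:
-- 		W = []
-- 		for i in range(ws):
-- 			W.append(w&0xff)
-- 			w >>= 8
-- 		R += W if byteorder == 'little' else W[::-1]
-- 	return R
-- ===== SOURCE B (Python) =====
-- def words_to_bytes(L, ws, byteorder):
--     R = []
--     if ws <= 0:
--         return R
--     order = 'little' if byteorder == 'little' else 'big'
--     M = 1 << (8 * ws)
--     for w in L:
--         R += (w % M).to_bytes(ws, order)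
--     return R
-- ===== Notes on version B (the rewrite author's own statement) =====
-- stated objective: faster
-- what changed: Replaces the per-word bit shift/mask loop and list reversal with a single int.to_bytes library conversion (after reducing the word mod 2^(8*ws), which is what the shift loop computes), letting C code produce the bytes in the requested order.
import Mathlib
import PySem

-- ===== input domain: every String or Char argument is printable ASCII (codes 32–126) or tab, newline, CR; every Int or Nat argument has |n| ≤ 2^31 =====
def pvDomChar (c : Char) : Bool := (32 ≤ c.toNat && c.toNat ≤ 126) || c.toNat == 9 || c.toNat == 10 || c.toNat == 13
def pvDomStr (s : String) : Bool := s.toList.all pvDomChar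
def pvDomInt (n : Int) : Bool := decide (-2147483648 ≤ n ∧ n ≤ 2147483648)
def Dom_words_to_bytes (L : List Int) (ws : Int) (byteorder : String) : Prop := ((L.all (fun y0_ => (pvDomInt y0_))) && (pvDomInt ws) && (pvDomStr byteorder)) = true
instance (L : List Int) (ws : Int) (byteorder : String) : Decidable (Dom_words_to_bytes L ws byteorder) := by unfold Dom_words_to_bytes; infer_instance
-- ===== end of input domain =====

-- B replaces A's per-word bit shift/mask loop with a single base-256 conversion of the
-- word reduced mod 2^(8*ws) (int.to_bytes in Source B), for a constant-factor speedup.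

-- ===== PORT A =====
-- A: for each word, append ws low bytes via 'w & 0xff' / 'w >>= 8'; extend R with W
-- (little) or W[::-1] (ported as List.reverse — exact for the full step -1 slice).
def words_to_bytes (L : List Int) (ws : Int) (byteorder : String) : List Int :=
  L.foldl (fun R w =>
    let p := (PySem.List.pyRange 0 ws 1).foldl
      (fun (st : List Int × Int) _ => (st.1 ++ [PySem.Int.band st.2 255], st.2 >>> (8 : Nat)))
      ([], w)
    R ++ (if byteorder = "little" then p.1 else p.1.reverse)) []

-- ===== PORT B =====
-- Source B's (w % M).to_bytes(ws, order) ported as little-endian base-256 digit extraction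
-- (the argument is reduced mod 2^(8*ws), so it is in range), reversed for 'big'.
def toBytesLE : Nat → Int → List Int
  | 0, _ => []
  | k+1, m => PySem.Int.mod m 256 :: toBytesLE k (PySem.Int.floordiv m 256)

def words_to_bytes_alt (L : List Int) (ws : Int) (byteorder : String) : List Int :=
  if ws ≤ 0 then []
  else
    let order := if byteorder = "little" then "little" else "big"
    let M : Int := 2 ^ (8 * ws.toNat)   -- Source B: M = 1 << (8 * ws)
    L.foldl (fun R w =>
      R ++ (if order = "little" then toBytesLE ws.toNat (PySem.Int.mod w M)
            else (toBytesLE ws.toNat (PySem.Int.mod w M)).reverse)) []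

-- ===== PRECONDITION & SPEC =====
def Spec_words_to_bytes (L : List Int) (ws : Int) (byteorder : String) (out : List Int) : Prop := out = words_to_bytes_alt L ws byteorder
instance (L : List Int) (ws : Int) (byteorder : String) (out : List Int) : Decidable (Spec_words_to_bytes L ws byteorder out) := by unfold Spec_words_to_bytes; infer_instance

-- ===== CLAIM (what is proved, stated in full; the proofs are below) =====
def Claim_equal_words_to_bytes : Prop := ∀ (L : List Int) (ws : Int) (byteorder : String), Dom_words_to_bytes L ws byteorder → Spec_words_to_bytes L ws byteorder (words_to_bytes L ws byteorder)

-- ===== LEMMAS AND PROOFS =====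

-- Python's w & 0xff is the low byte, i.e. w mod 256 (also for negative w).
theorem band255 (w : Int) : PySem.Int.band w 255 = w % 256 := by
  cases w with
  | ofNat n =>
    have h2 : n &&& 255 = n % 256 := by
      have := Nat.and_two_pow_sub_one_eq_mod n 8
      norm_num at this
      exact this
    rw [show (Int.ofNat n) = ((n : Nat) : Int) from rfl,
        show (255 : Int) = ((255 : Nat) : Int) from rfl,
        PySem.Int.band_natCast, h2]
    omega
  | negSucc k =>
    have hk : 255 &&& k = k % 256 := by
      rw [Nat.and_comm]
      have := Nat.and_two_pow_sub_one_eq_mod k 8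
      norm_num at this
      exact this
    rw [Int.negSucc_eq]
    unfold PySem.Int.band
    rw [if_neg (by omega), if_pos (by norm_num : (0:Int) ≤ 255)]
    norm_num
    rw [show (255:Int).toNat = 255 from rfl, hk]
    omega

-- Python's w >> 8 is floor division by 256 (also for negative w).
theorem shr8 (w : Int) : w >>> (8 : Nat) = w / 256 := by
  cases w with
  | ofNat n =>
    show (Int.ofNat (n >>> 8)) = Int.ofNat n / 256
    rw [Nat.shiftRight_eq_div_pow]
    norm_num
  | negSucc k =>
    show Int.negSucc (k >>> 8) = Int.negSucc k / 256
    rw [Nat.shiftRight_eq_div_pow, Int.negSucc_ediv k (by norm_num : (0:Int) < 256)]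
    simp only [Int.negSucc_eq]
    have hde : ((k:Int)).ediv 256 = (k:Int) / 256 := rfl
    rw [hde]
    omega

theorem mod_div_aux (w M : Int) : (w % (256 * M)) / 256 = (w / 256) % M := by
  have h256 : (256 : Int) ≠ 0 := by norm_num
  have e1 : w % (256 * M) = w + (-(M * (w / (256 * M)))) * 256 := by
    rw [Int.emod_def]; ring
  rw [e1, Int.add_mul_ediv_right _ _ h256]
  have e2 : (w / 256) % M = w / 256 - M * (w / 256 / M) := by rw [Int.emod_def]
  rw [e2, Int.ediv_ediv_of_nonneg (by norm_num : (0:Int) ≤ 256)]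
  ring

-- A's inner shift/mask loop produces exactly the base-256 little-endian digits of w mod 2^(8k).
theorem inner_loop (l : List Int) (W : List Int) (w : Int) :
    (l.foldl (fun (st : List Int × Int) _ => (st.1 ++ [PySem.Int.band st.2 255], st.2 >>> (8 : Nat))) (W, w)).1
      = W ++ toBytesLE l.length (w % 2 ^ (8 * l.length)) := by
  induction l generalizing W w with
  | nil => simp [toBytesLE]
  | cons x l ih =>
    simp only [List.foldl_cons, List.length_cons]
    rw [ih]
    have hpow : (2 : Int) ^ (8 * (l.length + 1)) = 256 * 2 ^ (8 * l.length) := by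
      have h : 8 * (l.length + 1) = 8 * l.length + 8 := by ring
      rw [h, pow_add]; norm_num; ring
    simp only [toBytesLE]
    rw [PySem.Int.mod_eq_emod_of_pos (by norm_num : (0:Int) < 256),
        PySem.Int.floordiv_eq_ediv_of_pos (by norm_num : (0:Int) < 256),
        hpow, mod_div_aux w _,
        Int.emod_emod_of_dvd w (dvd_mul_right 256 (2 ^ (8 * l.length))),
        band255 w, shr8 w]
    simp

theorem foldl_append_congr {α : Type} (g h : α → List Int) (hgh : ∀ w, g w = h w)
    (l : List α) (acc : List Int) :
    l.foldl (fun a x => a ++ g x) acc = l.foldl (fun a x => a ++ h x) acc := by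
  simp only [hgh]

-- ===== VERDICT (by name: the statement is the Claim_ definition above) =====
theorem words_to_bytes_spec : Claim_equal_words_to_bytes := by
  intro L ws bo _
  unfold Spec_words_to_bytes words_to_bytes words_to_bytes_alt
  by_cases hws : ws ≤ 0
  · simp only [if_pos hws, PySem.List.pyRange_one_eq_nil hws, List.foldl_nil]
    by_cases hbo : bo = "little" <;>
      simp [hbo]
  · have hws' : 0 < ws := by omega
    simp only [if_neg hws]
    refine foldl_append_congr _ _ ?_ L []
    intro w
    have hlen : (PySem.List.pyRange 0 ws 1).length = ws.toNat := by
      rw [PySem.List.length_pyRange_one]; omega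
    have hin := inner_loop (PySem.List.pyRange 0 ws 1) [] w
    rw [hlen] at hin
    have hMpos : (0 : Int) < 2 ^ (8 * ws.toNat) := by positivity
    rw [PySem.Int.mod_eq_emod_of_pos hMpos]
    by_cases hbo : bo = "little" <;> simp [hbo, hin]
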